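-- pv_equiv track=rewrite | github.com/visvikbharti/CRISPRArchitect | topopred/accessibility.py | _build_structured_regions
-- ===== SOURCE A (Python) =====
-- from typing import List, Optional, Tuple, Dict
--
-- def _build_structured_regions(
--
--     structured_positions: Dict[int, str],
--     seq_len: int,
-- ) -> List[Tuple[int, int, str]]:
--     """
--     Merge adjacent structured positions into contiguous regions.
--
--     This converts a position-level dictionary into a list of (start, end, type)
--     tuples representing contiguous stretches of the same structure type.
--
--     Parameters
--     ----------
--     structured_positions : dict
--         Position -> structure_type mapping.
--     seq_len : int
--         Total sequence length.
--
--     Returns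
--     -------
--     list of (int, int, str)
--         Contiguous structured regions as (start, end, type).
--     """
--     if not structured_positions:
--         return []
--
--     regions: List[Tuple[int, int, str]] = []
--     sorted_positions = sorted(structured_positions.keys())
--
--     # Walk through sorted positions, merging adjacent ones of the same type.
--     current_start = sorted_positions[0]
--     current_end = sorted_positions[0] + 1
--     current_type = structured_positions[sorted_positions[0]]
--
--     for pos in sorted_positions[1:]:
--         stype = structured_positions[pos]
--         if pos == current_end and stype == current_type:
--             # Extend the current region.
--             current_end = pos + 1
--         else:
--             # Save the current region and start a new one.
--             regions.append((current_start, current_end, current_type))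
--             current_start = pos
--             current_end = pos + 1
--             current_type = stype
--
--     # Don't forget the last region.
--     regions.append((current_start, current_end, current_type))
--     return regions
-- ===== SOURCE B (Python) =====
-- def _build_structured_regions(structured_positions, seq_len):
--     # Stateless boundary detection: a position starts a region iff its left
--     # neighbour is absent or differently typed; ends a region iff its right
--     # neighbour is.  Pair the sorted starts with the sorted ends.
--     d = structured_positions
--     keys = sorted(d)
--     starts = [p for p in keys if d.get(p - 1) != d[p]]
--     ends = [p for p in keys if d.get(p + 1) != d[p]]
--     return [(s, e + 1, d[s]) for s, e in zip(starts, ends)]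
-- ===== Notes on version B (the rewrite author's own statement) =====
-- stated objective: alternative
-- what changed: B replaces A's stateful single pass that merges each sorted key into a current (start,end,type) run with stateless boundary detection: it filters the sorted keys for region starts (left neighbour absent or differently typed) and region ends (right neighbour absent or differently typed) via dict lookups and zips the two lists into regions.
import Mathlib
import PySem

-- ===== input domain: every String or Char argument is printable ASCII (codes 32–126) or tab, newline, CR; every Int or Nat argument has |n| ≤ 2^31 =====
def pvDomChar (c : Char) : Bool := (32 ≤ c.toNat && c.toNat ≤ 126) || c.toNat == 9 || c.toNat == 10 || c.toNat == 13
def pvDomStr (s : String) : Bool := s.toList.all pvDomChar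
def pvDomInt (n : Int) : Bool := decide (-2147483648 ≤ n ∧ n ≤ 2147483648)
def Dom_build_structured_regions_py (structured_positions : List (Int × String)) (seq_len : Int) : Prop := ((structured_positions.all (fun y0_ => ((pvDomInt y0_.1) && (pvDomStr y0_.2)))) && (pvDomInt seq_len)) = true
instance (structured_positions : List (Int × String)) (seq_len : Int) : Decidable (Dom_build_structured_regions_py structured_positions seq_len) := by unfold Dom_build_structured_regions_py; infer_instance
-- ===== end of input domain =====

-- B replaces A's stateful run-merging pass with stateless boundary detection:
-- filter the sorted keys for region starts and region ends by neighbour lookups, then zip.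

-- ===== PORT A =====
-- d[pos] via getD: every looked-up pos comes from d.keys, so the default is never used.
def build_structured_regions_py (structured_positions : List (Int × String)) (seq_len : Int) : List (Int × Int × String) :=
  match PySem.List.sorted (PySem.Dict.ofList structured_positions).keys (fun x => x) false with
  | [] => []   -- 'if not structured_positions: return []'
  | k0 :: rest =>
    let st := rest.foldl
      (fun (s : List (Int × Int × String) × Int × Int × String) pos =>
        if pos = s.2.2.1 ∧ PySem.Dict.getD (PySem.Dict.ofList structured_positions) pos "" = s.2.2.2 then
          (s.1, s.2.1, pos + 1, s.2.2.2)
        else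
          (s.1 ++ [(s.2.1, s.2.2.1, s.2.2.2)], pos, pos + 1, PySem.Dict.getD (PySem.Dict.ofList structured_positions) pos ""))
      (([] : List (Int × Int × String)), k0, k0 + 1, PySem.Dict.getD (PySem.Dict.ofList structured_positions) k0 "")
    st.1 ++ [(st.2.1, st.2.2.1, st.2.2.2)]

-- ===== PORT B =====
-- 'd.get(p-1)' is Dict.get? (Option), 'd[p]' is getD (p always a key); the three
-- comprehensions become two filters over the sorted keys and a map over their zip.
def build_structured_regions_py_alt (structured_positions : List (Int × String)) (seq_len : Int) : List (Int × Int × String) :=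
  let d := PySem.Dict.ofList structured_positions
  let keys := PySem.List.sorted d.keys (fun x => x) false
  let starts := keys.filter (fun p => decide (PySem.Dict.get? d (p - 1) ≠ some (PySem.Dict.getD d p "")))
  let ends := keys.filter (fun p => decide (PySem.Dict.get? d (p + 1) ≠ some (PySem.Dict.getD d p "")))
  (starts.zip ends).map (fun se => (se.1, se.2 + 1, PySem.Dict.getD d se.1 ""))

-- ===== PRECONDITION & SPEC =====
def Spec_build_structured_regions_py (structured_positions : List (Int × String)) (seq_len : Int) (out : List (Int × Int × String)) : Prop := out = build_structured_regions_py_alt structured_positions seq_len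
instance (structured_positions : List (Int × String)) (seq_len : Int) (out : List (Int × Int × String)) : Decidable (Spec_build_structured_regions_py structured_positions seq_len out) := by unfold Spec_build_structured_regions_py; infer_instance

-- ===== CLAIM (what is proved, stated in full; the proofs are below) =====
def Claim_equal_build_structured_regions_py : Prop := ∀ (structured_positions : List (Int × String)) (seq_len : Int), Dom_build_structured_regions_py structured_positions seq_len → Spec_build_structured_regions_py structured_positions seq_len (build_structured_regions_py structured_positions seq_len)

-- ===== LEMMAS AND PROOFS =====

-- Direct-style form of A's loop over the tail of the sorted key list.
def runA (g : Int → String) (s e : Int) (t : String) : List Int → List (Int × Int × String)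
  | [] => [(s, e, t)]
  | p :: ps =>
    if p = e ∧ g p = t then runA g s (p + 1) t ps
    else (s, e, t) :: runA g p (p + 1) (g p) ps

-- A's foldl-with-accumulator equals runA.
theorem foldA_eq_runA (g : Int → String) (l : List Int) :
    ∀ (acc : List (Int × Int × String)) (s e : Int) (t : String),
      (let st := l.foldl
        (fun (st : List (Int × Int × String) × Int × Int × String) pos =>
          if pos = st.2.2.1 ∧ g pos = st.2.2.2 then
            (st.1, st.2.1, pos + 1, st.2.2.2)
          else
            (st.1 ++ [(st.2.1, st.2.2.1, st.2.2.2)], pos, pos + 1, g pos))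
        (acc, s, e, t)
       st.1 ++ [(st.2.1, st.2.2.1, st.2.2.2)]) = acc ++ runA g s e t l := by
  induction l with
  | nil => intro acc s e t; simp [runA]
  | cons p ps ih =>
    intro acc s e t
    by_cases h : p = e ∧ g p = t
    · simp only [List.foldl_cons, runA, if_pos h]
      have := ih acc s (p + 1) t
      simpa [h.1, h.2] using this
    · simp only [List.foldl_cons, runA, if_neg h]
      have := ih (acc ++ [(s, e, t)]) p (p + 1) (g p)
      rw [this, List.append_assoc]
      rfl

-- Boundary detection equals the run-merging loop: on a strictly increasing list l
-- of keys all ≥ e, containing every key ≥ e, with e-1 a key of the pending region's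
-- type t = value of s, zipping the start-boundaries with the end-boundaries
-- (the pending start s and end-candidate e-1 prepended) rebuilds runA's regions.
theorem zip_eq_runA (g : Int → Option String) (l : List Int) :
    ∀ (s e : Int) (t : String),
      l.Pairwise (· < ·) →
      (∀ p ∈ l, e ≤ p) →
      (∀ x : Int, e ≤ x → g x ≠ none → x ∈ l) →
      (∀ p ∈ l, g p ≠ none) →
      t = (g s).getD "" →
      g (e - 1) = some t →
      runA (fun p => (g p).getD "") s e t l
        = ((s :: l.filter (fun p => decide (g (p - 1) ≠ some ((g p).getD "")))).zip
            (((e - 1) :: l).filter (fun p => decide (g (p + 1) ≠ some ((g p).getD ""))))).map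
            (fun se => (se.1, se.2 + 1, (g se.1).getD "") ) := by
  induction l with
  | nil =>
    intro s e t _ _ hcl _ ht _
    have hge : g e = none := by
      by_contra hne
      exact (List.not_mem_nil (a := e)) (hcl e le_rfl hne)
    have he1 : e - 1 + 1 = e := by omega
    simp [runA, he1, hge, ht]
  | cons p ps ih =>
    intro s e t hpw hge hcl hkey ht hgt
    have hpe : e ≤ p := hge p (List.mem_cons_self ..)
    have hps : ∀ q ∈ ps, p < q := (List.pairwise_cons.mp hpw).1
    obtain ⟨vp, hvp⟩ := Option.ne_none_iff_exists'.mp (hkey p (List.mem_cons_self ..))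
    have hvpD : (g p).getD "" = vp := by rw [hvp]; rfl
    have he1 : e - 1 + 1 = e := by omega
    -- the IH instance shared by both branches
    have hpw' : ps.Pairwise (· < ·) := (List.pairwise_cons.mp hpw).2
    have hge' : ∀ q ∈ ps, p + 1 ≤ q := fun q hq => by have := hps q hq; omega
    have hcl' : ∀ x : Int, p + 1 ≤ x → g x ≠ none → x ∈ ps := by
      intro x hx hne
      have hxl : x ∈ p :: ps := hcl x (by omega) hne
      rcases List.mem_cons.mp hxl with h | h
      · omega
      · exact h
    have hkey' : ∀ q ∈ ps, g q ≠ none := fun q hq => hkey q (List.mem_cons_of_mem _ hq)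
    have hp11 : p + 1 - 1 = p := by omega
    by_cases h : p = e ∧ (g p).getD "" = t
    · -- merge: p is not a start, e-1 is not an end
      have hvt : vp = t := by rw [← hvpD]; exact h.2
      have hsb : g (p - 1) = some ((g p).getD "") := by
        rw [show p - 1 = e - 1 by omega, hgt, hvpD, hvt]
      have heb : g e = some ((g (e - 1)).getD "") := by
        have hgd : (g (e - 1)).getD "" = t := by rw [hgt]; rfl
        rw [hgd, ← h.1, hvp]
        exact congrArg some hvt
      have hIH := ih s (p + 1) t hpw' hge' hcl' hkey' ht
        (by rw [hp11, hvp]; exact congrArg some hvt)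
      simp only [runA, if_pos h, List.filter_cons]
      rw [hIH]
      have hsb' : (decide (g (p - 1) ≠ some ((g p).getD ""))) = false := by
        simp [hsb]
      have heb' : (decide (g e ≠ some ((g (e - 1)).getD ""))) = false := by
        simp [heb]
      simp [List.filter_cons, he1, hsb', heb', hp11]
    · -- no merge: p starts a region, e-1 ends one
      have hsb : g (p - 1) ≠ some ((g p).getD "") := by
        by_cases hpe' : p = e
        · rw [show p - 1 = e - 1 by omega, hgt]
          intro hc
          exact h ⟨hpe', by injection hc with hc'; exact hc'.symm⟩
        · have hnone : g (p - 1) = none := by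
            by_contra hne
            have hmem : p - 1 ∈ p :: ps := hcl (p - 1) (by omega) hne
            rcases List.mem_cons.mp hmem with hh | hh
            · omega
            · have := hps _ hh; omega
          rw [hnone]; simp
      have heb : g e ≠ some ((g (e - 1)).getD "") := by
        rw [hgt]
        show g e ≠ some t
        by_cases hpe' : p = e
        · rw [← hpe', hvp]
          intro hc
          injection hc with hc'
          exact h ⟨hpe', by rw [hvpD, hc']⟩
        · have hnone : g e = none := by
            by_contra hne
            have hmem : e ∈ p :: ps := hcl e le_rfl hne
            rcases List.mem_cons.mp hmem with hh | hh
            · omega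
            · have := hps _ hh; omega
          rw [hnone]; simp
      have s1 : List.filter (fun q => decide (g (q - 1) ≠ some ((g q).getD ""))) (p :: ps)
          = p :: List.filter (fun q => decide (g (q - 1) ≠ some ((g q).getD ""))) ps :=
        List.filter_cons_of_pos (by simpa using hsb)
      have e1 : List.filter (fun q => decide (g (q + 1) ≠ some ((g q).getD ""))) ((e - 1) :: p :: ps)
          = (e - 1) :: List.filter (fun q => decide (g (q + 1) ≠ some ((g q).getD ""))) (p :: ps) :=
        List.filter_cons_of_pos (by simp only [he1]; simpa using heb)
      have hIH := ih p (p + 1) ((g p).getD "") hpw' hge' hcl' hkey' rfl (by rw [hp11, hvp]; rfl)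
      rw [hp11] at hIH
      simp only [runA, if_neg h]
      rw [s1, e1, List.zip_cons_cons, List.map_cons, ← hIH]
      simp [he1, ht]

-- The ascending sort of nodup Int keys is strictly increasing.
theorem sorted_strict (ks : List Int) (hnd : ks.Nodup) :
    (PySem.List.sorted ks (fun x => x) false).Pairwise (· < ·) := by
  have hperm := PySem.List.sorted_perm ks (fun x => x) false
  have hnodup : (PySem.List.sorted ks (fun x => x) false).Nodup := hperm.nodup_iff.mpr hnd
  have hle : (PySem.List.sorted ks (fun x => x) false).Pairwise (fun a b => a ≤ b) :=
    PySem.List.sorted_pairwise ks (fun x => x)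
  exact (hle.and hnodup).imp (fun {a b} h => lt_of_le_of_ne h.1 h.2)

-- ===== VERDICT (by name: the statement is the Claim_ definition above) =====
theorem build_structured_regions_py_spec : Claim_equal_build_structured_regions_py := by
  intro sp seq_len _
  unfold Spec_build_structured_regions_py build_structured_regions_py build_structured_regions_py_alt
  set d := PySem.Dict.ofList sp with hd
  have hnd : d.keys.Nodup := PySem.Dict.nodup_keys_ofList sp
  have hstrict := sorted_strict d.keys hnd
  have hmem : ∀ x : Int, x ∈ PySem.List.sorted d.keys (fun x => x) false ↔ PySem.Dict.get? d x ≠ none := by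
    intro x
    rw [PySem.List.mem_sorted]
    constructor
    · intro hx hc
      exact ((PySem.Dict.get?_eq_none_iff_not_mem_keys d x).mp hc) hx
    · intro hx
      by_contra hc
      exact hx ((PySem.Dict.get?_eq_none_iff_not_mem_keys d x).mpr hc)
  simp only [PySem.Dict.getD_eq_get?_getD]
  cases hL : PySem.List.sorted d.keys (fun x => x) false with
  | nil => simp
  | cons k0 rest =>
    dsimp only
    rw [hL] at hstrict hmem
    have hk0 : PySem.Dict.get? d k0 ≠ none := (hmem k0).mp (List.mem_cons_self ..)
    obtain ⟨v0, hv0⟩ := Option.ne_none_iff_exists'.mp hk0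
    have hrest_gt : ∀ q ∈ rest, k0 < q := (List.pairwise_cons.mp hstrict).1
    have hA := foldA_eq_runA (fun pos => (PySem.Dict.get? d pos).getD "") rest
      [] k0 (k0 + 1) ((PySem.Dict.get? d k0).getD "")
    simp only [List.nil_append] at hA
    have hB := zip_eq_runA (PySem.Dict.get? d) rest k0 (k0 + 1) ((PySem.Dict.get? d k0).getD "")
      (List.pairwise_cons.mp hstrict).2
      (fun q hq => by have := hrest_gt q hq; omega)
      (by
        intro x hx hne
        have hxl : x ∈ k0 :: rest := (hmem x).mpr hne
        rcases List.mem_cons.mp hxl with hh | hh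
        · omega
        · exact hh)
      (fun q hq => (hmem q).mp (List.mem_cons_of_mem _ hq))
      rfl
      (by rw [show k0 + 1 - 1 = k0 by omega, hv0]; rfl)
    -- align the filters: k0 is always a start, and k0+1-1 = k0
    have hk0start : PySem.Dict.get? d (k0 - 1) = none := by
      by_contra hne
      have hmem' : k0 - 1 ∈ k0 :: rest := (hmem (k0 - 1)).mpr hne
      rcases List.mem_cons.mp hmem' with hh | hh
      · omega
      · have := hrest_gt _ hh; omega
    have h11 : k0 + 1 - 1 = k0 := by omega
    rw [h11] at hB
    rw [hA, hB]
    congr 2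
    rw [List.filter_cons]
    simp [hk0start]
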